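-- pv_equiv track=rewrite | github.com/Arihanth007/Automata-Theory | q3.py | handle_multiple_edges
-- ===== SOURCE A (Python) =====
-- def handle_multiple_edges(states, transition_funct):
--     for s1 in states:
--         for s2 in states:
--
--             multiple_edges_let = []
--             to_remove = []
--
--             for row in transition_funct:
--                 _x = row[0]
--                 _l = row[1]
--                 _y = row[2]
--                 if s2 == _y and s1 == _x:
--                     multiple_edges_let.append(
--                         [ele for ele in [_l] if ele not in multiple_edges_let][0])
--                     to_remove.append(row)
--
--             edge = '('
--             for i, _let in enumerate(multiple_edges_let):
--                 if i == len(multiple_edges_let)-1: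
--                     edge += (_let + ')')
--                 else:
--                     edge += (_let + '+')
--
--             if len(multiple_edges_let) < 2:
--                 continue
--
--             transition_funct.append([s1, edge, s2])
--             for _row in to_remove:
--                 transition_funct.remove(_row)
--
--     return transition_funct
-- ===== SOURCE B (Python) =====
-- def handle_multiple_edges(states, transition_funct):
--     # Group transitions by (source, target) in one pass, then emit kept rows
--     # followed by one combined edge per multi-edge pair (return value only:
--     # unlike A, this does not mutate transition_funct in place).
--     state_set = set(states)
--     groups = {}
--     for row in transition_funct:
--         x, lab, y = row[0], row[1], row[2]
--         if x in state_set and y in state_set: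
--             groups.setdefault((x, y), []).append(lab)
--     out = [row for row in transition_funct
--            if len(groups.get((row[0], row[2]), ())) < 2]
--     emitted = set()
--     for s1 in states:
--         for s2 in states:
--             labs = groups.get((s1, s2), ())
--             if len(labs) >= 2 and (s1, s2) not in emitted:
--                 emitted.add((s1, s2))
--                 out.append([s1, '(' + '+'.join(labs) + ')', s2])
--     return out
-- ===== Notes on version B (the rewrite author's own statement) =====
-- stated objective: faster
-- what changed: B replaces A's per-state-pair rescans and in-place remove/append mutation of transition_funct with one grouping pass building a dict of labels keyed by (source,target), a single filter for the kept rows, and a pair loop that only does dict lookups (return value only: B does not mutate transition_funct).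
-- outside the precondition, e.g. on handle_multiple_edges([], [['a']]): A returns [['a']], B raises IndexError
import Mathlib
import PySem

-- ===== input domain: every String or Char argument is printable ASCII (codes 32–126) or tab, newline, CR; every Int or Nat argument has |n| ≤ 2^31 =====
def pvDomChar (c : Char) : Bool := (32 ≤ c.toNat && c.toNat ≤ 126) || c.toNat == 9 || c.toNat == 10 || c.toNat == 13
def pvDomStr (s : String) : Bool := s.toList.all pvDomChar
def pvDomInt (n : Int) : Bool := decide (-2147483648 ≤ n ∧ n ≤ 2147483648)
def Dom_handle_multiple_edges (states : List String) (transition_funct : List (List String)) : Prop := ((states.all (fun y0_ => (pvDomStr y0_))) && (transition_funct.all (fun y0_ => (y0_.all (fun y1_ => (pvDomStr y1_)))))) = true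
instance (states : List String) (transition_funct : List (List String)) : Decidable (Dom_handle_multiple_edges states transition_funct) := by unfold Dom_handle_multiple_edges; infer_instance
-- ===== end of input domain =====

-- B groups the transitions by (source, target) in ONE pass over transition_funct instead of
-- re-scanning (and mutating) it for every pair of states; equivalence is about the RETURN value
-- only (A also mutates transition_funct in place, B does not).

-- ===== PORT A =====

/-- `row[i]` (default only reached outside `Pre_`). -/
def pvRowGet (row : List String) (i : Int) : String := (PySem.List.pyGet? row i).getD ""

/-- the inner `for row in transition_funct` loop of A: collects `multiple_edges_let` and `to_remove`. -/
def pvCollect (s1 s2 : String) (tf : List (List String)) : List String × List (List String) :=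
  tf.foldl (fun acc row =>
    let _x := pvRowGet row 0
    let _l := pvRowGet row 1
    let _y := pvRowGet row 2
    if s2 = _y ∧ s1 = _x then
      (acc.1 ++ [(PySem.List.pyGet? (if _l ∈ acc.1 then ([] : List String) else [_l]) 0).getD ""],
       acc.2 ++ [row])
    else acc) ([], [])

/-- the `edge` string-building loop of A (`for i, _let in enumerate(...)`). -/
def pvEdge (melet : List String) : String :=
  (PySem.List.enumerate melet 0).foldl (fun edge p =>
    if p.1 = (melet.length : Int) - 1 then edge ++ p.2 ++ ")" else edge ++ p.2 ++ "+") "("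

/-- the `for _row in to_remove: transition_funct.remove(_row)` loop of A. -/
def pvRemoveAll (tf torem : List (List String)) : List (List String) :=
  torem.foldl (fun tf r => (PySem.List.remove? tf r).getD tf) tf

/-- the body of A's two nested `for s1/s2 in states` loops. -/
def pvPairStep (tf : List (List String)) (s1 s2 : String) : List (List String) :=
  let mt := pvCollect s1 s2 tf
  let edge := pvEdge mt.1
  if mt.1.length < 2 then tf
  else pvRemoveAll (tf ++ [[s1, edge, s2]]) mt.2

def handle_multiple_edges (states : List String) (transition_funct : List (List String)) : List (List String) :=
  states.foldl (fun tf s1 => states.foldl (fun tf s2 => pvPairStep tf s1 s2) tf) transition_funct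

-- ===== PORT B =====

/-- B's grouping pass: `groups.setdefault((x, y), []).append(lab)` under the membership guard. -/
def pvGroups (states : List String) (tf : List (List String)) :
    PySem.Dict (String × String) (List String) :=
  tf.foldl (fun g row =>
    let x := pvRowGet row 0
    let lab := pvRowGet row 1
    let y := pvRowGet row 2
    if x ∈ PySem.Set.ofList states ∧ y ∈ PySem.Set.ofList states then
      g.modify (x, y) [] (· ++ [lab])
    else g) PySem.Dict.empty

def handle_multiple_edges_alt (states : List String) (transition_funct : List (List String)) : List (List String) :=
  let groups := pvGroups states transition_funct
  let out := transition_funct.filter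
    (fun row => (groups.getD (pvRowGet row 0, pvRowGet row 2) []).length < 2)
  (states.foldl (fun acc s1 => states.foldl (fun acc s2 =>
      let labs := groups.getD (s1, s2) []
      if 2 ≤ labs.length ∧ (s1, s2) ∉ acc.2 then
        (acc.1 ++ [[s1, "(" ++ PySem.Str.join "+" labs ++ ")", s2]], PySem.Set.add acc.2 (s1, s2))
      else acc) acc) (out, (PySem.Set.empty : PySem.Set (String × String)))).1

-- ===== PRECONDITION & SPEC =====
-- Pre_ excludes the inputs on which A raises IndexError: a row with fewer than 3 entries
-- (A indexes row[0..2] whenever states is nonempty; rows < 3 are excluded even for empty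
-- states, where A returns unchanged but B raises too — see cites), and two transitions with
-- the same (source, label, target) triple between a pair of listed states (A's dedup
-- comprehension indexes an empty list there).
def Pre_handle_multiple_edges (states : List String) (transition_funct : List (List String)) : Prop :=
  (∀ r ∈ transition_funct, 3 ≤ r.length) ∧
  transition_funct.Pairwise (fun r1 r2 =>
    ¬(r1.getD 0 "" ∈ states ∧ r1.getD 2 "" ∈ states ∧
      r1.getD 0 "" = r2.getD 0 "" ∧ r1.getD 1 "" = r2.getD 1 "" ∧ r1.getD 2 "" = r2.getD 2 ""))
instance (states : List String) (transition_funct : List (List String)) : Decidable (Pre_handle_multiple_edges states transition_funct) := by unfold Pre_handle_multiple_edges; infer_instance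

def pvWitness_handle_multiple_edges : List String × List (List String) :=
  (["a", "b"], [["a", "x", "b"], ["a", "y", "b"], ["b", "z", "c"]])

def Spec_handle_multiple_edges (states : List String) (transition_funct : List (List String)) (out : List (List String)) : Prop := out = handle_multiple_edges_alt states transition_funct
instance (states : List String) (transition_funct : List (List String)) (out : List (List String)) : Decidable (Spec_handle_multiple_edges states transition_funct out) := by unfold Spec_handle_multiple_edges; infer_instance

-- ===== CLAIM (what is proved, stated in full; the proofs are below) =====
def Claim_equal_handle_multiple_edges : Prop := ∀ (states : List String) (transition_funct : List (List String)), Dom_handle_multiple_edges states transition_funct → Pre_handle_multiple_edges states transition_funct → Spec_handle_multiple_edges states transition_funct (handle_multiple_edges states transition_funct)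

-- ===== LEMMAS AND PROOFS =====

-- ---- proof-side notions ----

def pvPairOf (r : List String) : String × String := (pvRowGet r 0, pvRowGet r 2)

/-- A's row-matching test for the state pair `p` (the `s2 == _y and s1 == _x` condition). -/
def pvMatchB (p : String × String) (r : List String) : Bool :=
  decide (p.2 = pvRowGet r 2 ∧ p.1 = pvRowGet r 0)

def pvMatched (p : String × String) (tf0 : List (List String)) : List (List String) :=
  tf0.filter (pvMatchB p)

def pvLabels (p : String × String) (tf0 : List (List String)) : List String :=
  (pvMatched p tf0).map (fun r => pvRowGet r 1)

def pvMrow (p : String × String) (tf0 : List (List String)) : List String :=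
  [p.1, pvEdge (pvLabels p tf0), p.2]

/-- the state pairs merged after processing the pair list `P`, in merge order. -/
def pvMP (tf0 : List (List String)) (P : List (String × String)) : List (String × String) :=
  P.foldl (fun M p => if 2 ≤ (pvMatched p tf0).length ∧ p ∉ M then M ++ [p] else M) []

def pvAllPairs (states : List String) : List (String × String) :=
  states.flatMap (fun s1 => states.map (fun s2 => (s1, s2)))

-- ---- small facts ----

theorem pvRowGet_nat (r : List String) (n : Nat) : pvRowGet r (n : Int) = r.getD n "" := by
  rw [pvRowGet, PySem.List.pyGet?_natCast]; simp [List.getD]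

theorem pvRowGet_zero (r : List String) : pvRowGet r 0 = r.getD 0 "" := by
  simpa using pvRowGet_nat r 0

theorem pvRowGet_one (r : List String) : pvRowGet r 1 = r.getD 1 "" := by
  simpa using pvRowGet_nat r 1

theorem pvRowGet_two (r : List String) : pvRowGet r 2 = r.getD 2 "" := by
  simpa using pvRowGet_nat r 2

theorem pvMatchB_iff (p : String × String) (r : List String) :
    pvMatchB p r = true ↔ pvPairOf r = p := by
  constructor
  · intro hb
    rw [pvMatchB, decide_eq_true_iff] at hb
    simp [pvPairOf, hb.1.symm, hb.2.symm]
  · rintro rfl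
    simp [pvMatchB, pvPairOf]

theorem pvRowGet_mrow0 (p : String × String) (tf0 : List (List String)) :
    pvRowGet (pvMrow p tf0) 0 = p.1 := by
  simp [pvMrow, pvRowGet_zero]

theorem pvRowGet_mrow2 (p : String × String) (tf0 : List (List String)) :
    pvRowGet (pvMrow p tf0) 2 = p.2 := by
  simp [pvMrow, pvRowGet_two]

theorem pvPairOf_mrow (p : String × String) (tf0 : List (List String)) :
    pvPairOf (pvMrow p tf0) = p := by
  simp [pvPairOf, pvRowGet_mrow0, pvRowGet_mrow2]

theorem pvMem_allPairs (states : List String) (p : String × String) :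
    p ∈ pvAllPairs states ↔ p.1 ∈ states ∧ p.2 ∈ states := by
  cases p with
  | mk a b => simp [pvAllPairs, List.mem_flatMap, List.mem_map]

-- ---- pvMP facts ----

theorem pvMP_append_singleton (tf0 : List (List String)) (P : List (String × String)) (p : String × String) :
    pvMP tf0 (P ++ [p]) =
      if 2 ≤ (pvMatched p tf0).length ∧ p ∉ pvMP tf0 P then pvMP tf0 P ++ [p] else pvMP tf0 P := by
  simp [pvMP, List.foldl_append]

theorem pvMP_nodup (tf0 : List (List String)) (P : List (String × String)) :
    (pvMP tf0 P).Nodup := by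
  induction P using List.reverseRecOn with
  | nil => simp [pvMP]
  | append_singleton P p ih =>
    rw [pvMP_append_singleton]
    split_ifs with h
    · simp only [List.nodup_append, List.nodup_singleton, true_and, ih]
      intro x hx b hb
      simp only [List.mem_singleton] at hb
      exact fun hxb => h.2 ((hb ▸ hxb) ▸ hx)
    · exact ih

theorem pvMem_MP (tf0 : List (List String)) (P : List (String × String)) (q : String × String) :
    q ∈ pvMP tf0 P ↔ q ∈ P ∧ 2 ≤ (pvMatched q tf0).length := by
  induction P using List.reverseRecOn with
  | nil => simp [pvMP]
  | append_singleton P p ih =>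
    rw [pvMP_append_singleton]
    split_ifs with h
    · simp only [List.mem_append, List.mem_singleton]
      constructor
      · rintro (hq | rfl)
        · exact ⟨Or.inl (ih.mp hq).1, (ih.mp hq).2⟩
        · exact ⟨Or.inr rfl, h.1⟩
      · rintro ⟨hq | rfl, hb⟩
        · exact Or.inl (ih.mpr ⟨hq, hb⟩)
        · exact Or.inr rfl
    · rw [ih]
      simp only [List.mem_append, List.mem_singleton]
      constructor
      · rintro ⟨hq, hb⟩; exact ⟨Or.inl hq, hb⟩
      · rintro ⟨hq | rfl, hb⟩
        · exact ⟨hq, hb⟩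
        · rcases Classical.em (q ∈ pvMP tf0 P) with hm | hm
          · exact ih.mp hm
          · exact absurd ⟨hb, hm⟩ h

-- ---- generic loop-shape lemmas ----

theorem pvFoldl_nested {α β : Type} (xs ys : List β) (f : α → β → β → α) (init : α) :
    xs.foldl (fun a x => ys.foldl (fun a y => f a x y) a) init
      = (xs.flatMap (fun x => ys.map (fun y => (x, y)))).foldl (fun a p => f a p.1 p.2) init := by
  induction xs generalizing init with
  | nil => rfl
  | cons x xs ih => simp [List.foldl_append, List.foldl_map, ih]

theorem pvFilter_eq_of_nodup {α : Type} [DecidableEq α] (M : List α) (p : α) (h : M.Nodup) :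
    M.filter (fun x => decide (x = p)) = if p ∈ M then [p] else [] := by
  induction M with
  | nil => simp
  | cons a M ih =>
    simp only [List.nodup_cons] at h
    by_cases hap : a = p
    · subst hap
      have hflt : M.filter (fun x => decide (x = a)) = [] := by
        rw [List.filter_eq_nil_iff]; intro b hb hba
        exact h.1 ((by simpa using hba : b = a) ▸ hb)
      rw [List.filter_cons]
      simp [hflt]
    · rw [List.filter_cons]
      simp only [hap, decide_eq_true_eq]
      rw [ih h.2]
      by_cases hm : p ∈ M <;> simp [hm, List.mem_cons, Ne.symm hap]

-- ---- A's inner collect loop ----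

theorem pvCollect_aux (s1 s2 : String) (tf : List (List String)) (m : List String) (t : List (List String))
    (h : (m ++ pvLabels (s1, s2) tf).Nodup) :
    tf.foldl (fun acc row =>
      let _x := pvRowGet row 0
      let _l := pvRowGet row 1
      let _y := pvRowGet row 2
      if s2 = _y ∧ s1 = _x then
        (acc.1 ++ [(PySem.List.pyGet? (if _l ∈ acc.1 then ([] : List String) else [_l]) 0).getD ""],
         acc.2 ++ [row])
      else acc) (m, t)
      = (m ++ pvLabels (s1, s2) tf, t ++ pvMatched (s1, s2) tf) := by
  induction tf generalizing m t with
  | nil => simp [pvLabels, pvMatched]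
  | cons r tf ih =>
    have hmb : pvMatchB (s1, s2) r = decide (s2 = pvRowGet r 2 ∧ s1 = pvRowGet r 0) := rfl
    by_cases hc : s2 = pvRowGet r 2 ∧ s1 = pvRowGet r 0
    · have hmt : pvMatched (s1, s2) (r :: tf) = r :: pvMatched (s1, s2) tf := by
        rw [pvMatched, List.filter_cons_of_pos (by rw [hmb]; exact decide_eq_true hc), pvMatched]
      have hlb : pvLabels (s1, s2) (r :: tf) = pvRowGet r 1 :: pvLabels (s1, s2) tf := by
        rw [pvLabels, hmt, List.map_cons, pvLabels]
      rw [hlb] at h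
      have hnm : pvRowGet r 1 ∉ m := by
        intro hmem
        rcases List.nodup_append.mp h with ⟨-, -, hdisj⟩
        exact hdisj _ hmem _ (List.mem_cons_self ..) rfl
      simp only [List.foldl_cons, if_pos hc]
      have hget : (PySem.List.pyGet? (if pvRowGet r 1 ∈ m then ([] : List String)
          else [pvRowGet r 1]) 0).getD "" = pvRowGet r 1 := by
        rw [if_neg hnm]; simp
      show tf.foldl _ (m ++ [_], t ++ [r]) = _
      rw [hget, ih (m ++ [pvRowGet r 1]) (t ++ [r]) (by simpa using h), hmt, hlb]
      simp
    · have hmt : pvMatched (s1, s2) (r :: tf) = pvMatched (s1, s2) tf := by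
        rw [pvMatched, List.filter_cons_of_neg (by rw [hmb]; simpa using hc), pvMatched]
      have hlb : pvLabels (s1, s2) (r :: tf) = pvLabels (s1, s2) tf := by
        rw [pvLabels, hmt, pvLabels]
      rw [hlb] at h
      simp only [List.foldl_cons, if_neg hc]
      rw [ih m t h, hmt, hlb]

theorem pvCollect_spec (s1 s2 : String) (tf : List (List String))
    (h : (pvLabels (s1, s2) tf).Nodup) :
    pvCollect s1 s2 tf = (pvLabels (s1, s2) tf, pvMatched (s1, s2) tf) := by
  have := pvCollect_aux s1 s2 tf [] [] (by simpa using h)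
  simpa [pvCollect] using this

-- ---- A's remove loop ----

theorem pvRemoveAll_cons_not_mem (a : List String) (l torem : List (List String)) (h : a ∉ torem) :
    pvRemoveAll (a :: l) torem = a :: pvRemoveAll l torem := by
  induction torem generalizing l with
  | nil => rfl
  | cons r torem ih =>
    have har : a ≠ r := fun hh => h (hh ▸ List.mem_cons_self ..)
    have hstep : (PySem.List.remove? (a :: l) r).getD (a :: l)
        = a :: (PySem.List.remove? l r).getD l := by
      rw [PySem.List.remove?_cons_of_ne (h := har)]
      cases PySem.List.remove? l r <;> simp
    simp only [pvRemoveAll, List.foldl_cons] at *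
    rw [hstep, ih _ (fun hm => h (List.mem_cons_of_mem _ hm))]

theorem pvRemoveAll_filter (xs ys : List (List String)) (q : List String → Bool)
    (h : (xs.filter q).Nodup) :
    pvRemoveAll (xs ++ ys) (xs.filter q) = xs.filter (fun r => !q r) ++ ys := by
  induction xs with
  | nil => simp [pvRemoveAll]
  | cons a xs ih =>
    by_cases ha : q a
    · rw [List.filter_cons_of_pos ha] at h ⊢
      have h' := (List.nodup_cons.mp h).2
      have : pvRemoveAll ((a :: xs) ++ ys) (a :: xs.filter q)
          = pvRemoveAll (xs ++ ys) (xs.filter q) := by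
        simp only [pvRemoveAll, List.foldl_cons, List.cons_append,
          PySem.List.remove?_cons_self, Option.getD_some]
      rw [this, ih h', List.filter_cons_of_neg (by simp [ha])]
    · rw [List.filter_cons_of_neg ha] at h ⊢
      have hnotin : a ∉ xs.filter q := fun hm => ha (by simpa using List.of_mem_filter hm)
      rw [List.cons_append, pvRemoveAll_cons_not_mem _ _ _ hnotin, ih h,
        List.filter_cons_of_pos (by simp [ha]), List.cons_append]

-- ---- the edge string ----

theorem pvJoin_singleton (l : String) : PySem.Str.join "+" [l] = l := by
  simp [PySem.Str.join]

theorem pvJoin_cons_cons (x y : String) (a : List String) :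
    PySem.Str.join "+" (x :: y :: a) = x ++ "+" ++ PySem.Str.join "+" (y :: a) := by
  apply String.toList_injective
  simp [PySem.Str.toList_join, PySem.Chars.join_cons_cons]

theorem pvPlusFold_join (ms : List String) (l acc : String) :
    ms.foldl (fun e x => e ++ x ++ "+") acc ++ l ++ ")"
      = acc ++ PySem.Str.join "+" (ms ++ [l]) ++ ")" := by
  induction ms generalizing acc with
  | nil => simp [pvJoin_singleton]
  | cons m ms ih =>
    cases ms with
    | nil =>
      show acc ++ m ++ "+" ++ l ++ ")" = acc ++ PySem.Str.join "+" [m, l] ++ ")"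
      rw [show ([m, l] : List String) = m :: l :: [] from rfl, pvJoin_cons_cons, pvJoin_singleton]
      apply String.toList_injective
      simp
    | cons m2 ms2 =>
      show List.foldl _ (acc ++ m ++ "+") (m2 :: ms2) ++ l ++ ")" = _
      rw [ih]
      have : (m :: m2 :: ms2) ++ [l] = m :: m2 :: (ms2 ++ [l]) := by simp
      rw [this, pvJoin_cons_cons m m2 (ms2 ++ [l])]
      apply String.toList_injective
      simp

theorem pvEdge_eq_join (melet : List String) (h : melet ≠ []) :
    pvEdge melet = "(" ++ PySem.Str.join "+" melet ++ ")" := by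
  obtain ⟨ms, l, rfl⟩ : ∃ ms x, melet = ms ++ [x] := by
    induction melet using List.reverseRecOn with
    | nil => exact absurd rfl h
    | append_singleton ms x _ => exact ⟨ms, x, rfl⟩
  rw [pvEdge, PySem.List.enumerate_append, List.foldl_append]
  have hinner : (PySem.List.enumerate ms 0).foldl (fun edge p =>
      if p.1 = ((ms ++ [l]).length : Int) - 1 then edge ++ p.2 ++ ")" else edge ++ p.2 ++ "+") "("
      = ms.foldl (fun e x => e ++ x ++ "+") "(" := by
    rw [PySem.List.foldl_congr_mem
      (g := fun (edge : String) (p : Int × String) => edge ++ p.2 ++ "+")]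
    · conv_rhs => rw [← PySem.List.map_snd_enumerate ms 0]
      rw [List.foldl_map]
    · intro acc p hp
      rcases (PySem.List.mem_enumerate_iff ..).mp hp with ⟨k, hk, rfl⟩
      have : ¬((0 : Int) + k = ((ms ++ [l]).length : Int) - 1) := by
        simp only [List.length_append, List.length_cons, List.length_nil]
        push_cast
        omega
      rw [if_neg this]
  rw [hinner]
  have hlast : PySem.List.enumerate [l] (0 + ms.length) = [((ms.length : Int), l)] := by
    rw [PySem.List.enumerate_cons, PySem.List.enumerate_nil]
    norm_num
  rw [hlast, List.foldl_cons, List.foldl_nil]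
  rw [if_pos (by simp only [List.length_append, List.length_cons, List.length_nil]; push_cast; omega)]
  exact pvPlusFold_join ms l "("

-- ---- Pre_ consequences ----

theorem pvMem_matched (p : String × String) (tf0 : List (List String)) (r : List String)
    (h : r ∈ pvMatched p tf0) : pvRowGet r 0 = p.1 ∧ pvRowGet r 2 = p.2 := by
  have := (pvMatchB_iff p r).mp (List.of_mem_filter h)
  rw [pvPairOf, Prod.ext_iff] at this
  exact ⟨this.1, this.2⟩

theorem pvMatched_pairwise_of_pre (states : List String) (tf0 : List (List String))
    (hpre : Pre_handle_multiple_edges states tf0) (p : String × String) :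
    (pvMatched p tf0).Pairwise (fun r1 r2 =>
      ¬(r1.getD 0 "" ∈ states ∧ r1.getD 2 "" ∈ states ∧
        r1.getD 0 "" = r2.getD 0 "" ∧ r1.getD 1 "" = r2.getD 1 "" ∧ r1.getD 2 "" = r2.getD 2 "")) :=
  hpre.2.sublist (List.filter_sublist)

theorem pvLabels_nodup (states : List String) (tf0 : List (List String))
    (hpre : Pre_handle_multiple_edges states tf0)
    (p : String × String) (h1 : p.1 ∈ states) (h2 : p.2 ∈ states) :
    (pvLabels p tf0).Nodup := by
  have hne := pvMatched_pairwise_of_pre states tf0 hpre p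
  have hlab : (pvMatched p tf0).Pairwise (fun r1 r2 => pvRowGet r1 1 ≠ pvRowGet r2 1) := by
    rw [List.pairwise_iff_forall_sublist] at hne ⊢
    intro a b hsub
    have hmem := hsub.subset
    have ha := pvMem_matched p tf0 a (hmem (by simp))
    have hb := pvMem_matched p tf0 b (hmem (by simp))
    intro heq
    refine hne hsub ?_
    rw [← pvRowGet_zero, ← pvRowGet_zero, ← pvRowGet_one, ← pvRowGet_one,
      ← pvRowGet_two, ← pvRowGet_two]
    exact ⟨ha.1 ▸ h1, ha.2 ▸ h2, by rw [ha.1, hb.1], heq, by rw [ha.2, hb.2]⟩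
  rw [pvLabels, List.Nodup, List.pairwise_map]
  exact hlab

theorem pvMatched_nodup (states : List String) (tf0 : List (List String))
    (hpre : Pre_handle_multiple_edges states tf0)
    (p : String × String) (h1 : p.1 ∈ states) (h2 : p.2 ∈ states) :
    (pvMatched p tf0).Nodup := by
  have hne := pvMatched_pairwise_of_pre states tf0 hpre p
  rw [List.Nodup, List.pairwise_iff_forall_sublist]
  rw [List.pairwise_iff_forall_sublist] at hne
  intro a b hsub
  have hmem := hsub.subset
  have ha := pvMem_matched p tf0 a (hmem (by simp))
  intro heq
  subst heq
  refine hne hsub ?_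
  rw [← pvRowGet_zero, ← pvRowGet_two]
  exact ⟨ha.1 ▸ h1, ha.2 ▸ h2, rfl, rfl, rfl⟩

theorem pvMatchB_mrow (p q : String × String) (tf0 : List (List String)) :
    pvMatchB p (pvMrow q tf0) = decide (q = p) := by
  by_cases h : q = p
  · subst h
    simp [(pvMatchB_iff q (pvMrow q tf0)).mpr (pvPairOf_mrow q tf0)]
  · have : pvMatchB p (pvMrow q tf0) = false := by
      rcases Bool.eq_false_or_eq_true (pvMatchB p (pvMrow q tf0)) with hb | hb
      · exact absurd (pvPairOf_mrow q tf0 ▸ (pvMatchB_iff p _).mp hb) h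
      · exact hb
    simp [this, h]

theorem pvLabels_length (p : String × String) (tf0 : List (List String)) :
    (pvLabels p tf0).length = (pvMatched p tf0).length := by
  rw [pvLabels, List.length_map]

theorem pvFilter_filterPart (tf0 : List (List String)) (M : List (String × String)) (p : String × String) :
    (tf0.filter (fun r => decide (pvPairOf r ∉ M))).filter (pvMatchB p)
      = if p ∈ M then [] else pvMatched p tf0 := by
  rw [List.filter_filter]
  split_ifs with hm
  · rw [List.filter_eq_nil_iff]
    intro r _ hr
    simp only [Bool.and_eq_true, decide_eq_true_eq] at hr
    exact hr.2 ((pvMatchB_iff p r).mp hr.1 ▸ hm)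
  · rw [pvMatched]
    apply List.filter_congr
    intro r _
    by_cases hb : pvMatchB p r = true
    · simp [hb, (pvMatchB_iff p r).mp hb ▸ hm]
    · simp [Bool.eq_false_iff.mpr hb]

theorem pvFilter_mergedPart (tf0 : List (List String)) (M : List (String × String)) (p : String × String)
    (hnd : M.Nodup) :
    (M.map (fun q => pvMrow q tf0)).filter (pvMatchB p)
      = if p ∈ M then [pvMrow p tf0] else [] := by
  rw [List.filter_map]
  have : (pvMatchB p ∘ fun q => pvMrow q tf0) = fun q => decide (q = p) := by
    funext q; exact pvMatchB_mrow p q tf0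
  rw [this, pvFilter_eq_of_nodup M p hnd]
  split_ifs <;> simp

-- ---- the shape of the list after processing a pair list P (A's loop invariant) ----

theorem pvLoop_inv (states : List String) (tf0 : List (List String))
    (hpre : Pre_handle_multiple_edges states tf0)
    (P : List (String × String)) (hP : ∀ p ∈ P, p.1 ∈ states ∧ p.2 ∈ states) :
    P.foldl (fun tf p => pvPairStep tf p.1 p.2) tf0
      = tf0.filter (fun r => decide (pvPairOf r ∉ pvMP tf0 P))
        ++ (pvMP tf0 P).map (fun q => pvMrow q tf0) := by
  induction P using List.reverseRecOn with
  | nil => simp [pvMP]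
  | append_singleton P p ih =>
    have hP' : ∀ q ∈ P, q.1 ∈ states ∧ q.2 ∈ states :=
      fun q hq => hP q (List.mem_append_left _ hq)
    have hp := hP p (by simp)
    rw [List.foldl_append, ih hP', List.foldl_cons, List.foldl_nil]
    have heta : ((p.1, p.2) : String × String) = p := rfl
    have hndM : (pvMP tf0 P).Nodup := pvMP_nodup tf0 P
    set M := pvMP tf0 P with hMdef
    set Y := M.map (fun q => pvMrow q tf0) with hYdef
    set X := tf0.filter (fun r => decide (pvPairOf r ∉ M)) with hXdef
    have hmt : pvMatched p (X ++ Y)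
        = if p ∈ M then [pvMrow p tf0] else pvMatched p tf0 := by
      rw [pvMatched, List.filter_append, hXdef, hYdef,
        pvFilter_filterPart tf0 M p, pvFilter_mergedPart tf0 M p hndM]
      split_ifs <;> simp
    have hlb : pvLabels p (X ++ Y)
        = (if p ∈ M then [pvMrow p tf0] else pvMatched p tf0).map (fun r => pvRowGet r 1) := by
      rw [pvLabels, hmt]
    by_cases hm : p ∈ M
    · rw [if_pos hm] at hmt hlb
      have hcol : pvCollect p.1 p.2 (X ++ Y)
          = (pvLabels p (X ++ Y), pvMatched p (X ++ Y)) := by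
        apply pvCollect_spec
        rw [heta, hlb]
        simp
      rw [pvPairStep, hcol]
      dsimp only
      have hlen : (pvLabels p (X ++ Y)).length = 1 := by rw [hlb]; simp
      rw [if_pos (by omega : (pvLabels p (X ++ Y)).length < 2)]
      have hMP : pvMP tf0 (P ++ [p]) = M := by
        rw [pvMP_append_singleton, if_neg (fun hh => hh.2 hm)]
      rw [hMP]
    · rw [if_neg hm] at hmt hlb
      have hnodup : (pvLabels p tf0).Nodup := pvLabels_nodup states tf0 hpre p hp.1 hp.2
      have hcol : pvCollect p.1 p.2 (X ++ Y)
          = (pvLabels p (X ++ Y), pvMatched p (X ++ Y)) := by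
        apply pvCollect_spec
        rw [heta, hlb, ← pvLabels]
        exact hnodup
      have hlbfull : pvLabels p (X ++ Y) = pvLabels p tf0 := by rw [hlb, ← pvLabels]
      by_cases hbig : 2 ≤ (pvMatched p tf0).length
      · have hMP : pvMP tf0 (P ++ [p]) = M ++ [p] := by
          rw [pvMP_append_singleton, if_pos ⟨hbig, hm⟩]
        rw [pvPairStep, hcol]
        dsimp only
        rw [if_neg (by rw [hlbfull, pvLabels_length]; omega)]
        have hXq : X.filter (pvMatchB p) = pvMatched p tf0 := by
          rw [hXdef, pvFilter_filterPart tf0 M p, if_neg hm]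
        have hplus : pvEdge (pvLabels p (X ++ Y)) = pvEdge (pvLabels p tf0) := by rw [hlbfull]
        rw [hmt, hplus]
        have hstep : pvRemoveAll ((X ++ Y) ++ [[p.1, pvEdge (pvLabels p tf0), p.2]]) (pvMatched p tf0)
            = X.filter (fun r => !pvMatchB p r) ++ (Y ++ [pvMrow p tf0]) := by
          rw [List.append_assoc, ← hXq]
          apply pvRemoveAll_filter
          rw [hXq]
          exact pvMatched_nodup states tf0 hpre p hp.1 hp.2
        rw [hstep, hMP]
        have hXneg : X.filter (fun r => !pvMatchB p r)
            = tf0.filter (fun r => decide (pvPairOf r ∉ M ++ [p])) := by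
          rw [hXdef, List.filter_filter]
          apply List.filter_congr
          intro r _
          by_cases hpp : pvPairOf r = p
          · simp [(pvMatchB_iff p r).mpr hpp, hpp]
          · have hb : pvMatchB p r = false := by
              rcases Bool.eq_false_or_eq_true (pvMatchB p r) with hbb | hbb
              · exact absurd ((pvMatchB_iff p r).mp hbb) hpp
              · exact hbb
            simp [hb, hpp]
        rw [hXneg]
        simp only [List.map_append, List.map_singleton]
        rfl
      · have hMP : pvMP tf0 (P ++ [p]) = M := by
          rw [pvMP_append_singleton, if_neg (by intro hh; exact hbig hh.1)]
        rw [pvPairStep, hcol]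
        dsimp only
        rw [if_pos (by rw [hlbfull, pvLabels_length]; omega)]
        rw [hMP]

-- ---- B's groups dict ----

theorem pvGroups_getD (states : List String) (tf : List (List String)) (p : String × String) :
    (pvGroups states tf).getD p []
      = ((tf.filter (fun r => decide (pvRowGet r 0 ∈ PySem.Set.ofList states ∧
              pvRowGet r 2 ∈ PySem.Set.ofList states))).filter
          (fun r => pvPairOf r == p)).map (fun r => pvRowGet r 1) := by
  have h1 : pvGroups states tf
      = (tf.filter (fun row => decide (pvRowGet row 0 ∈ PySem.Set.ofList states ∧
            pvRowGet row 2 ∈ PySem.Set.ofList states))).foldl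
          (fun g row => g.modify (pvRowGet row 0, pvRowGet row 2) [] (· ++ [pvRowGet row 1]))
          PySem.Dict.empty := by
    have h0 : pvGroups states tf
        = tf.foldl (fun g row =>
            if pvRowGet row 0 ∈ PySem.Set.ofList states ∧ pvRowGet row 2 ∈ PySem.Set.ofList states then
              g.modify (pvRowGet row 0, pvRowGet row 2) [] (· ++ [pvRowGet row 1])
            else g) PySem.Dict.empty := rfl
    rw [h0]
    exact PySem.List.foldl_ite_eq_foldl_filter
      (p := fun row => pvRowGet row 0 ∈ PySem.Set.ofList states ∧
        pvRowGet row 2 ∈ PySem.Set.ofList states)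
      (f := fun (g : PySem.Dict (String × String) (List String)) row =>
        g.modify (pvRowGet row 0, pvRowGet row 2) [] (· ++ [pvRowGet row 1]))
      tf PySem.Dict.empty
  rw [h1]
  rw [← List.foldl_map
    (f := fun row : List String => ((pvRowGet row 0, pvRowGet row 2), pvRowGet row 1))
    (g := fun (d : PySem.Dict (String × String) (List String)) pr => d.modify pr.1 [] (· ++ [pr.2]))]
  rw [PySem.Dict.getD_foldl_modify_append, PySem.Dict.getD_empty]
  rw [List.filter_map, List.map_map]
  simp only [List.nil_append]
  rfl

theorem pvGroups_getD_mem (states : List String) (tf : List (List String)) (p : String × String)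
    (h1 : p.1 ∈ states) (h2' : p.2 ∈ states) :
    (pvGroups states tf).getD p [] = pvLabels p tf := by
  rw [pvGroups_getD, List.filter_filter, pvLabels, pvMatched]
  congr 1
  apply List.filter_congr
  intro r _
  by_cases hp : pvPairOf r = p
  · have hc : pvRowGet r 0 ∈ PySem.Set.ofList states ∧ pvRowGet r 2 ∈ PySem.Set.ofList states := by
      have h0 : pvRowGet r 0 = p.1 := congrArg Prod.fst hp
      have h2 : pvRowGet r 2 = p.2 := congrArg Prod.snd hp
      exact ⟨h0 ▸ (PySem.Set.mem_ofList ..).mpr h1, h2 ▸ (PySem.Set.mem_ofList ..).mpr h2'⟩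
    simp [hp, hc, (pvMatchB_iff p r).mpr hp]
  · have hb : pvMatchB p r = false := by
      rcases Bool.eq_false_or_eq_true (pvMatchB p r) with h | h
      · exact absurd ((pvMatchB_iff p r).mp h) hp
      · exact h
    simp [hp, hb]

theorem pvGroups_getD_not_mem (states : List String) (tf : List (List String)) (p : String × String)
    (h : ¬(p.1 ∈ states ∧ p.2 ∈ states)) :
    (pvGroups states tf).getD p [] = [] := by
  rw [pvGroups_getD, List.filter_filter]
  rw [show (List.filter (fun a => pvPairOf a == p && decide
      (pvRowGet a 0 ∈ PySem.Set.ofList states ∧ pvRowGet a 2 ∈ PySem.Set.ofList states)) tf) = [] from ?_, List.map_nil]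
  rw [List.filter_eq_nil_iff]
  intro r _ hr
  simp only [Bool.and_eq_true, beq_iff_eq, decide_eq_true_eq, PySem.Set.mem_ofList] at hr
  exact h ⟨congrArg Prod.fst hr.1 ▸ hr.2.1, congrArg Prod.snd hr.1 ▸ hr.2.2⟩

-- ---- B's output loop ----

theorem pvBLoop (states : List String) (tf0 : List (List String))
    (P : List (String × String)) (hP : ∀ p ∈ P, p.1 ∈ states ∧ p.2 ∈ states)
    (out0 : List (List String)) :
    P.foldl (fun acc p =>
        let labs := (pvGroups states tf0).getD p []
        if 2 ≤ labs.length ∧ p ∉ acc.2 then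
          (acc.1 ++ [[p.1, "(" ++ PySem.Str.join "+" labs ++ ")", p.2]], PySem.Set.add acc.2 p)
        else acc) (out0, (PySem.Set.empty : PySem.Set (String × String)))
      = (out0 ++ (pvMP tf0 P).map (fun q =>
            [q.1, "(" ++ PySem.Str.join "+" (pvLabels q tf0) ++ ")", q.2]), pvMP tf0 P) := by
  induction P using List.reverseRecOn with
  | nil => simp [pvMP, PySem.Set.empty]
  | append_singleton P p ih =>
    have hP' : ∀ q ∈ P, q.1 ∈ states ∧ q.2 ∈ states :=
      fun q hq => hP q (List.mem_append_left _ hq)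
    have hp := hP p (by simp)
    rw [List.foldl_append, ih hP', List.foldl_cons, List.foldl_nil]
    simp only [pvGroups_getD_mem states tf0 p hp.1 hp.2, pvMP_append_singleton, pvLabels_length]
    split_ifs with h1
    · rw [Prod.mk.injEq]
      refine ⟨by simp, ?_⟩
      simp [PySem.Set.add, h1.2]
    · rfl

-- ---- assembly ----

theorem pvMain (states : List String) (tf0 : List (List String))
    (hpre : Pre_handle_multiple_edges states tf0) :
    handle_multiple_edges states tf0 = handle_multiple_edges_alt states tf0 := by
  have hPall : ∀ p ∈ pvAllPairs states, p.1 ∈ states ∧ p.2 ∈ states :=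
    fun p hp => (pvMem_allPairs states p).mp hp
  have hA : handle_multiple_edges states tf0
      = (pvAllPairs states).foldl (fun tf p => pvPairStep tf p.1 p.2) tf0 := by
    rw [handle_multiple_edges, pvAllPairs]
    exact pvFoldl_nested states states (fun tf s1 s2 => pvPairStep tf s1 s2) tf0
  have hout : handle_multiple_edges_alt states tf0
      = tf0.filter (fun row => decide
            (((pvGroups states tf0).getD (pvRowGet row 0, pvRowGet row 2) []).length < 2))
        ++ (pvMP tf0 (pvAllPairs states)).map (fun q =>
            [q.1, "(" ++ PySem.Str.join "+" (pvLabels q tf0) ++ ")", q.2]) := by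
    show ((states.foldl (fun acc s1 => states.foldl (fun acc s2 =>
        let labs := (pvGroups states tf0).getD (s1, s2) []
        if 2 ≤ labs.length ∧ (s1, s2) ∉ acc.2 then
          (acc.1 ++ [[s1, "(" ++ PySem.Str.join "+" labs ++ ")", s2]], PySem.Set.add acc.2 (s1, s2))
        else acc) acc)
        (tf0.filter (fun row => decide
            (((pvGroups states tf0).getD (pvRowGet row 0, pvRowGet row 2) []).length < 2)),
         (PySem.Set.empty : PySem.Set (String × String)))).1) = _
    rw [pvFoldl_nested states states
      (f := fun acc s1 s2 =>
        let labs := (pvGroups states tf0).getD (s1, s2) []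
        if 2 ≤ labs.length ∧ (s1, s2) ∉ acc.2 then
          (acc.1 ++ [[s1, "(" ++ PySem.Str.join "+" labs ++ ")", s2]], PySem.Set.add acc.2 (s1, s2))
        else acc)]
    rw [pvAllPairs] at hPall ⊢
    rw [pvBLoop states tf0 _ hPall]
  rw [hA, pvLoop_inv states tf0 hpre (pvAllPairs states) hPall, hout]
  congr 1
  · apply List.filter_congr
    intro r _
    rw [decide_eq_decide]
    by_cases hin : (pvPairOf r).1 ∈ states ∧ (pvPairOf r).2 ∈ states
    · rw [show ((pvRowGet r 0, pvRowGet r 2) : String × String) = pvPairOf r from rfl,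
        pvGroups_getD_mem states tf0 _ hin.1 hin.2]
      rw [pvMem_MP, pvMem_allPairs, pvLabels_length]
      constructor
      · intro hnot
        by_contra hge
        exact hnot ⟨hin, by omega⟩
      · intro hlt hand
        omega
    · rw [show ((pvRowGet r 0, pvRowGet r 2) : String × String) = pvPairOf r from rfl,
        pvGroups_getD_not_mem states tf0 _ hin]
      simp only [List.length_nil]
      constructor
      · intro _; omega
      · intro _ hmem
        exact hin ((pvMem_allPairs states _).mp ((pvMem_MP tf0 _ _).mp hmem).1)
  · apply List.map_congr_left
    intro q hq
    have hbig := ((pvMem_MP tf0 _ q).mp hq).2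
    have hne : pvLabels q tf0 ≠ [] := by
      intro hnil
      have := pvLabels_length q tf0
      rw [hnil] at this
      simp at this
      omega
    rw [pvMrow, pvEdge_eq_join _ hne]

-- ===== VERDICT (by name: the statement is the Claim_ definition above) =====
theorem handle_multiple_edges_spec : Claim_equal_handle_multiple_edges := by
  intro states tf _hdom hpre
  show _ = _
  exact pvMain states tf hpre
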